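-- pv_equiv track=rewrite | github.com/jdbalistreri/adventofcode | y2019/src/day03.py | steps_to
-- ===== SOURCE A (Python) =====
-- def pair_contains(pair, point):
--     xp, yp = point
--     start, end = pair
--     x1, y1 = start
--     x2, y2 = end
--     return min(x1, x2) <= xp <= max(x1, x2) and min(y1, y2) <= yp <= max(y1, y2)
--
-- def distance_between(pair):
--     x1, y1 = pair[0]
--     x2, y2 = pair[1]
--     return abs(x2 - x1) + abs(y2 - y1)
--
-- def steps_to(point, wire):
--     steps = 0
--     for pair in wire:
--         if pair_contains(pair, point):
--             steps += distance_between((pair[0], point))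
--             break
--         steps += distance_between(pair)
--     return steps
-- ===== SOURCE B (Python) =====
-- def pair_contains(pair, point):
--     xp, yp = point
--     start, end = pair
--     x1, y1 = start
--     x2, y2 = end
--     return min(x1, x2) <= xp <= max(x1, x2) and min(y1, y2) <= yp <= max(y1, y2)
--
-- def distance_between(pair):
--     x1, y1 = pair[0]
--     x2, y2 = pair[1]
--     return abs(x2 - x1) + abs(y2 - y1)
--
-- def steps_to(point, wire):
--     # Right fold over the wire, built back-to-front: a containing segment
--     # discards everything accumulated after it (it resets the running value
--     # to the partial distance), so the leftmost containing segment wins.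
--     acc = 0
--     for pair in reversed(wire):
--         if pair_contains(pair, point):
--             acc = distance_between((pair[0], point))
--         else:
--             acc = distance_between(pair) + acc
--     return acc
-- ===== Notes on version B (the rewrite author's own statement) =====
-- stated objective: alternative
-- what changed: Replaces the forward accumulate-and-break scan by a right fold built back-to-front over the reversed wire, where a containing segment resets the running value to its partial distance (discarding the suffix), so the leftmost containing segment determines the result without any break or index search.
import Mathlib
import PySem

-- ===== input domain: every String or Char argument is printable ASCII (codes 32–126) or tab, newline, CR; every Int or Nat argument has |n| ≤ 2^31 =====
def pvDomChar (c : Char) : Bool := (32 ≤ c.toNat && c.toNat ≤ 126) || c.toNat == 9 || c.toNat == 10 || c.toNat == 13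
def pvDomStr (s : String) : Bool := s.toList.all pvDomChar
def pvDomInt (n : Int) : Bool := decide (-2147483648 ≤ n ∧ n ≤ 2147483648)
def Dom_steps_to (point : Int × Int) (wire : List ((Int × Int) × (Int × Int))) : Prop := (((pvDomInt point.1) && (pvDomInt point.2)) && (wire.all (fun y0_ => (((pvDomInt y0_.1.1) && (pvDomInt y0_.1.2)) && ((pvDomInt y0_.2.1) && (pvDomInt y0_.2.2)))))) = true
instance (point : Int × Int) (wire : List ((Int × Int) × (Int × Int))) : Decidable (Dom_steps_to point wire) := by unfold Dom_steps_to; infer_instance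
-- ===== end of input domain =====

-- B replaces A's forward accumulate-and-break scan by a back-to-front right fold in which a containing segment resets the accumulator; return values proved equal on all inputs.


-- ===== PORT A =====
def pairContains (pair : (Int × Int) × (Int × Int)) (point : Int × Int) : Bool :=
  let xp := point.1; let yp := point.2
  let x1 := pair.1.1; let y1 := pair.1.2
  let x2 := pair.2.1; let y2 := pair.2.2
  decide (min x1 x2 ≤ xp ∧ xp ≤ max x1 x2) && decide (min y1 y2 ≤ yp ∧ yp ≤ max y1 y2)

def distanceBetween (pair : (Int × Int) × (Int × Int)) : Int :=
  (pair.2.1 - pair.1.1).natAbs + (pair.2.2 - pair.1.2).natAbs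

-- A's for-loop with break: structural recursion over the wire with accumulator 'steps'
def stepsToLoop (point : Int × Int) : List ((Int × Int) × (Int × Int)) → Int → Int
  | [], steps => steps
  | pair :: rest, steps =>
      if pairContains pair point then steps + distanceBetween (pair.1, point)
      else stepsToLoop point rest (steps + distanceBetween pair)

def steps_to (point : Int × Int) (wire : List ((Int × Int) × (Int × Int))) : Int :=
  stepsToLoop point wire 0

-- ===== PORT B =====
-- Source B's loop over reversed(wire): a left fold over wire.reverse whose step
-- resets the running value on a containing segment, else adds the segment length.
def steps_to_alt (point : Int × Int) (wire : List ((Int × Int) × (Int × Int))) : Int :=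
  wire.reverse.foldl
    (fun acc pair =>
      if pairContains pair point then distanceBetween (pair.1, point)
      else distanceBetween pair + acc) 0

-- ===== PRECONDITION & SPEC =====
def Spec_steps_to (point : Int × Int) (wire : List ((Int × Int) × (Int × Int))) (out : Int) : Prop := out = steps_to_alt point wire
instance (point : Int × Int) (wire : List ((Int × Int) × (Int × Int))) (out : Int) : Decidable (Spec_steps_to point wire out) := by unfold Spec_steps_to; infer_instance

-- ===== CLAIM (what is proved, stated in full; the proofs are below) =====
def Claim_equal_steps_to : Prop := ∀ (point : Int × Int) (wire : List ((Int × Int) × (Int × Int))), Dom_steps_to point wire → Spec_steps_to point wire (steps_to point wire)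

-- ===== LEMMAS AND PROOFS =====
-- foldl over the reverse is the corresponding right fold
lemma alt_eq_foldr (point : Int × Int) (wire : List ((Int × Int) × (Int × Int))) :
    steps_to_alt point wire =
      wire.foldr
        (fun pair acc =>
          if pairContains pair point then distanceBetween (pair.1, point)
          else distanceBetween pair + acc) 0 := by
  unfold steps_to_alt
  rw [List.foldl_reverse]

lemma stepsToLoop_eq_alt (point : Int × Int) (wire : List ((Int × Int) × (Int × Int))) (s : Int) :
    stepsToLoop point wire s = s + steps_to_alt point wire := by
  induction wire generalizing s with
  | nil => simp [stepsToLoop, steps_to_alt]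
  | cons p rest ih =>
    rw [alt_eq_foldr]
    by_cases h : pairContains p point
    · simp [stepsToLoop, h]
    · simp only [stepsToLoop, h, if_neg, Bool.false_eq_true, not_false_iff, List.foldr_cons]
      rw [ih, alt_eq_foldr]
      ring

-- ===== VERDICT (by name: the statement is the Claim_ definition above) =====
theorem steps_to_spec : Claim_equal_steps_to := by
  intro point wire _
  show steps_to point wire = steps_to_alt point wire
  simpa using stepsToLoop_eq_alt point wire 0
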